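-- pv_equiv track=rewrite | github.com/monpie3/adventOfCode2024 | Day_25/task_25a.py | categorize_schemes
-- ===== SOURCE A (Python) =====
-- def categorize_schemes(schemes):
--     locks, keys = [], []
--
--     for scheme in schemes:
--         pins = count_pins(scheme)
--         if scheme[0][0] == "#":
--             locks.append(pins)
--         else:
--             keys.append(pins)
--     return keys, locks
--
-- def count_pins(scheme):
--     counter = dict()
--     for row_index in range(len(scheme)):
--         if row_index != 0 and row_index != len(scheme) - 1:
--             for col_index in range(len(scheme[row_index])):
--                 if col_index not in counter:
--                     counter[col_index] = 0
--
--                 if scheme[row_index][col_index] == "#":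
--                     counter[col_index] += 1
--     return [counter[pin] for pin in sorted(counter)]
-- ===== SOURCE B (Python) =====
-- def categorize_schemes(schemes):
--     locks = [count_pins(s) for s in schemes if s[0][0] == "#"]
--     keys = [count_pins(s) for s in schemes if s[0][0] != "#"]
--     return keys, locks
--
--
-- def count_pins(scheme):
--     interior = scheme[1:-1]
--     width = 0
--     for row in interior:
--         width = max(width, len(row))
--     return [sum(1 for row in interior if col < len(row) and row[col] == "#")
--             for col in range(width)]
-- ===== Notes on version B (the rewrite author's own statement) =====
-- stated objective: idiomatic
-- what changed: count_pins is recomputed column-major: B slices the interior rows scheme[1:-1] once, tracks the max interior row width, and builds each column's pin count independently with a per-column sum, replacing A's row-major scan that maintains a dict keyed by column index (with a membership test and dict update per cell) and then sorts its keys; the lock/key split becomes two comprehensions instead of one accumulating loop.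
import Mathlib
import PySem

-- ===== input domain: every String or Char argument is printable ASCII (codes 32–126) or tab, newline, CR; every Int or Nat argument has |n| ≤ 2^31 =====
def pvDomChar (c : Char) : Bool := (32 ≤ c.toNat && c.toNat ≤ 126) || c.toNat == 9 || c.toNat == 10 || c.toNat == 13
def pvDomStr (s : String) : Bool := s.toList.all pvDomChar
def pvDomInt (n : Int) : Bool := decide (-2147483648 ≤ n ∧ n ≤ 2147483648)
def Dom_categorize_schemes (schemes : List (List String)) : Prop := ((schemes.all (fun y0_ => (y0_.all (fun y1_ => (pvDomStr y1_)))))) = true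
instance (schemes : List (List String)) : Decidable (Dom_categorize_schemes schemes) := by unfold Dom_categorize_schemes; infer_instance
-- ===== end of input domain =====

-- B replaces A's row-major dict-of-column-counters with a column-major computation over the
-- interior slice scheme[1:-1], building each pin count independently (objective: idiomatic).

-- ===== PORT A =====
-- inner loop body of count_pins: one column of one interior row
def cpColStep (row : String) (counter : PySem.Dict Int Int) (col_index : Int) : PySem.Dict Int Int :=
  let counter := if counter.contains col_index then counter else counter.insert col_index 0
  if PySem.Str.pyGet? row col_index = some '#' then
    counter.insert col_index (counter.getD col_index 0 + 1)
  else counter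

-- outer loop body of count_pins: one row index (first and last row skipped)
def cpRowStep (scheme : List String) (counter : PySem.Dict Int Int) (row_index : Int) : PySem.Dict Int Int :=
  if row_index ≠ 0 ∧ row_index ≠ PySem.List.len scheme - 1 then
    (PySem.List.pyRange 0 (PySem.Str.len (PySem.List.pyGetD scheme row_index ""))).foldl
      (cpColStep (PySem.List.pyGetD scheme row_index "")) counter
  else counter

def count_pins (scheme : List String) : List Int :=
  let counter := (PySem.List.pyRange 0 (PySem.List.len scheme)).foldl (cpRowStep scheme) PySem.Dict.empty
  (PySem.List.sorted counter.keys (fun pin => pin)).map (fun pin => counter.getD pin 0)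

def categorize_schemes (schemes : List (List String)) : List (List Int) × List (List Int) :=
  let p := schemes.foldl (fun (p : List (List Int) × List (List Int)) scheme =>
    let pins := count_pins scheme
    if PySem.Str.pyGet? (PySem.List.pyGetD scheme 0 "") 0 = some '#' then (p.1 ++ [pins], p.2)
    else (p.1, p.2 ++ [pins])) ([], [])
  (p.2, p.1)

-- ===== PORT B =====
def count_pins_alt (scheme : List String) : List Int :=
  let interior := PySem.List.slice scheme (some 1) (some (-1))
  let width := interior.foldl (fun w row => max w (PySem.Str.len row)) 0
  (PySem.List.pyRange 0 width).map (fun col =>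
    interior.foldl (fun (s : Int) row =>
      if col < PySem.Str.len row ∧ PySem.Str.pyGet? row col = some '#' then s + 1 else s) 0)

def categorize_schemes_alt (schemes : List (List String)) : List (List Int) × List (List Int) :=
  let locks := (schemes.filter (fun s => PySem.Str.pyGet? (PySem.List.pyGetD s 0 "") 0 == some '#')).map count_pins_alt
  let keys := (schemes.filter (fun s => !(PySem.Str.pyGet? (PySem.List.pyGetD s 0 "") 0 == some '#'))).map count_pins_alt
  (keys, locks)

-- ===== PRECONDITION & SPEC =====
-- Pre_ excludes exactly the schemes on which Python A raises IndexError: a scheme that is the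
-- empty list, or whose first row is the empty string (A evaluates scheme[0][0]).
def Pre_categorize_schemes (schemes : List (List String)) : Prop :=
  ∀ s ∈ schemes, s ≠ [] ∧ s.headI.toList ≠ []
instance (schemes : List (List String)) : Decidable (Pre_categorize_schemes schemes) := by unfold Pre_categorize_schemes; infer_instance
def pvWitness_categorize_schemes : List (List String) := [["#", ".", "#"], [".", "#", "#"]]
def Spec_categorize_schemes (schemes : List (List String)) (out : List (List Int) × List (List Int)) : Prop := out = categorize_schemes_alt schemes
instance (schemes : List (List String)) (out : List (List Int) × List (List Int)) : Decidable (Spec_categorize_schemes schemes out) := by unfold Spec_categorize_schemes; infer_instance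

-- ===== CLAIM (what is proved, stated in full; the proofs are below) =====
def Claim_equal_categorize_schemes : Prop := ∀ (schemes : List (List String)), Dom_categorize_schemes schemes → Pre_categorize_schemes schemes → Spec_categorize_schemes schemes (categorize_schemes schemes)

-- ===== LEMMAS AND PROOFS =====

def intRange : Nat → List Int
  | 0 => []
  | n + 1 => intRange n ++ [(n : Int)]

theorem intRange_succ (n : Nat) : intRange (n + 1) = intRange n ++ [(n : Int)] := rfl

theorem mem_intRange {k : Int} {n : Nat} : k ∈ intRange n ↔ 0 ≤ k ∧ k < (n : Int) := by
  induction n with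
  | zero => simp [intRange]
  | succ n ih =>
    rw [intRange_succ, List.mem_append, ih, List.mem_singleton]
    push_cast
    constructor
    · rintro (⟨h0, h1⟩ | rfl) <;> omega
    · rintro ⟨h0, h1⟩
      by_cases h : k < (n : Int)
      · exact Or.inl ⟨h0, h⟩
      · right; omega

theorem intRange_pairwise (n : Nat) : (intRange n).Pairwise (fun a b : Int => a ≤ b) := by
  induction n with
  | zero => simp [intRange]
  | succ n ih =>
    rw [intRange_succ, List.pairwise_append]
    refine ⟨ih, List.pairwise_singleton _ _, fun a ha b hb => ?_⟩
    rw [List.mem_singleton] at hb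
    subst hb
    have := (mem_intRange.mp ha).2
    omega

theorem pyRange_eq_intRange (n : Nat) : PySem.List.pyRange 0 (n : Int) = intRange n := by
  induction n with
  | zero => exact PySem.List.pyRange_one_eq_nil le_rfl
  | succ n ih =>
    push_cast
    rw [PySem.List.pyRange_one_succ_right (by positivity), ih, intRange_succ]

-- invariant of A's inner column loop over one row
theorem cp_inner (row : String) (w : Nat) (n : Nat) (d : PySem.Dict Int Int)
    (hk : d.keys = intRange w) :
    ((PySem.List.pyRange 0 (n : Int)).foldl (cpColStep row) d).keys = intRange (max w n)
    ∧ ∀ c : Nat, ((PySem.List.pyRange 0 (n : Int)).foldl (cpColStep row) d).getD (c : Int) 0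
        = d.getD (c : Int) 0 + (if c < n ∧ row.toList[c]? = some '#' then 1 else 0) := by
  induction n with
  | zero =>
    rw [PySem.List.pyRange_one_eq_nil (by norm_num)]
    simp [hk]
  | succ n ih =>
    obtain ⟨ik, ihd⟩ := ih
    have hr : PySem.List.pyRange 0 ((n : Int) + 1) = PySem.List.pyRange 0 (n : Int) ++ [(n : Int)] :=
      PySem.List.pyRange_one_succ_right (by positivity)
    push_cast
    rw [hr, List.foldl_append, List.foldl_cons, List.foldl_nil]
    set e := (PySem.List.pyRange 0 (n : Int)).foldl (cpColStep row) d with he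
    have hx : PySem.Str.pyGet? row (n : Int) = row.toList[n]? := PySem.Str.pyGet?_natCast row n
    have hcont : e.contains (n : Int) = decide (n < max w n) := by
      rw [PySem.Dict.contains_eq_decide_mem_keys, ik]
      simp [mem_intRange]
    have hiff : ∀ c : Nat, c ≠ n →
        ((c < n + 1 ∧ row.toList[c]? = some '#') ↔ (c < n ∧ row.toList[c]? = some '#')) := by
      intro c hc
      constructor <;> rintro ⟨h1, h2⟩ <;> exact ⟨by omega, h2⟩
    by_cases hnw : n < w
    · have hmax : max w n = w := by omega
      have hmax' : max w (n + 1) = w := by omega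
      have hcont' : e.contains (n : Int) = true := by
        rw [hcont, decide_eq_true_eq]; omega
      unfold cpColStep
      simp only [hcont', if_true]
      by_cases hsh : PySem.Str.pyGet? row (n : Int) = some '#'
      · have h2 : row.toList[n]? = some '#' := by rw [← hx]; exact hsh
        rw [if_pos hsh]
        refine ⟨by rw [PySem.Dict.keys_insert_of_contains e _ hcont', ik, hmax, hmax'], ?_⟩
        intro c
        rw [PySem.Dict.getD_insert]
        by_cases hc : c = n
        · subst hc
          rw [if_pos rfl, ihd c, if_neg (fun h => absurd h.1 (by omega)),
            if_pos ⟨by omega, h2⟩]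
          omega
        · rw [if_neg (by exact_mod_cast hc), ihd c, if_congr (hiff c hc) rfl rfl]
      · have h2 : ¬ (row.toList[n]? = some '#') := by rw [← hx]; exact hsh
        rw [if_neg hsh]
        refine ⟨by rw [ik, hmax, hmax'], ?_⟩
        intro c
        rw [ihd c]
        by_cases hc : c = n
        · subst hc
          simp [h2]
        · rw [if_congr (hiff c hc) rfl rfl]
    · -- w ≤ n : the column is a fresh key
      have hmax : max w n = n := by omega
      have hmax' : max w (n + 1) = n + 1 := by omega
      have hcont' : e.contains (n : Int) = false := by
        rw [hcont, decide_eq_false_iff_not]; omega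
      have hd0 : d.getD ((n : Nat) : Int) 0 = 0 := by
        apply PySem.Dict.getD_of_not_contains
        rw [PySem.Dict.contains_eq_decide_mem_keys, hk, decide_eq_false_iff_not, mem_intRange]
        omega
      have he0 : e.getD ((n : Nat) : Int) 0 = 0 := by
        rw [ihd n, hd0, if_neg (fun h => absurd h.1 (by omega))]
        norm_num
      unfold cpColStep
      simp only [hcont', Bool.false_eq_true, if_false]
      by_cases hsh : PySem.Str.pyGet? row (n : Int) = some '#'
      · have h2 : row.toList[n]? = some '#' := by rw [← hx]; exact hsh
        rw [if_pos hsh, PySem.Dict.getD_insert_self, PySem.Dict.insert_insert_self]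
        refine ⟨by rw [PySem.Dict.keys_insert_of_not_contains e _ hcont', ik, hmax, hmax',
          intRange_succ], ?_⟩
        intro c
        rw [PySem.Dict.getD_insert]
        by_cases hc : c = n
        · subst hc
          rw [if_pos rfl, hd0, if_pos ⟨Nat.lt_succ_self c, h2⟩]
        · rw [if_neg (by exact_mod_cast hc), ihd c, if_congr (hiff c hc) rfl rfl]
      · rw [if_neg hsh]
        have h2 : ¬ (row.toList[n]? = some '#') := by rw [← hx]; exact hsh
        refine ⟨by rw [PySem.Dict.keys_insert_of_not_contains e _ hcont', ik, hmax, hmax',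
          intRange_succ], ?_⟩
        intro c
        rw [PySem.Dict.getD_insert]
        by_cases hc : c = n
        · subst hc
          rw [if_pos rfl, hd0, if_neg (fun h => absurd h.2 h2)]
          norm_num
        · rw [if_neg (by exact_mod_cast hc), ihd c, if_congr (hiff c hc) rfl rfl]


-- proof-side name for A's inner loop acting on one interior row
def innerFold (d : PySem.Dict Int Int) (row : String) : PySem.Dict Int Int :=
  (PySem.List.pyRange 0 (PySem.Str.len row)).foldl (cpColStep row) d

theorem str_len_eq (row : String) : PySem.Str.len row = ((row.toList.length : Nat) : Int) := by
  simp [pysem]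

theorem slice_interior (xs : List String) :
    PySem.List.slice xs (some 1) (some (-1)) = xs.dropLast.drop 1 := by
  rcases xs with _ | ⟨x, t⟩
  · simp [PySem.List.slice, PySem.List.clampIdx]
  · simp only [PySem.List.slice, PySem.List.clampIdx]
    norm_num
    rw [List.dropLast_eq_take]
    rw [if_neg (by omega : ¬ ((t.length : Int) < 0))]
    simp only [List.length_cons, Nat.add_sub_cancel]
    rcases t with _ | ⟨y, u⟩
    · simp
    · simp [List.take_succ_cons]

theorem outer_reduce (scheme : List String) :
    (PySem.List.pyRange 0 (PySem.List.len scheme)).foldl (cpRowStep scheme) PySem.Dict.empty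
    = (scheme.dropLast.drop 1).foldl innerFold PySem.Dict.empty := by
  obtain h0 | h1 | ⟨m, hm⟩ : scheme.length = 0 ∨ scheme.length = 1 ∨ ∃ m, scheme.length = m + 2 := by
    rcases hh : scheme.length with _ | _ | m
    · exact Or.inl rfl
    · exact Or.inr (Or.inl rfl)
    · exact Or.inr (Or.inr ⟨m, rfl⟩)
  · have : scheme = [] := List.eq_nil_of_length_eq_zero h0
    subst this
    simp [PySem.List.len, PySem.List.pyRange_one_eq_nil]
  · have hnil : scheme.dropLast.drop 1 = [] := by
      apply List.eq_nil_of_length_eq_zero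
      simp [h1]
    rw [hnil]
    unfold PySem.List.len
    rw [h1]
    rw [show ((1 : Nat) : Int) = 0 + 1 by norm_num, PySem.List.pyRange_one_singleton]
    simp [cpRowStep]
  · have hdl : scheme.dropLast.length = m + 1 := by simp [hm]
    unfold PySem.List.len
    rw [hm]
    have hcons : PySem.List.pyRange 0 (((m + 2 : Nat)) : Int)
        = 0 :: PySem.List.pyRange 1 (((m + 2 : Nat)) : Int) := by
      have h := PySem.List.pyRange_one_cons (a := 0) (b := (((m + 2 : Nat)) : Int)) (by positivity)
      simpa using h
    rw [hcons, List.foldl_cons]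
    have hstep0 : cpRowStep scheme PySem.Dict.empty 0 = PySem.Dict.empty := by
      simp [cpRowStep]
    rw [hstep0]
    have hsucc : PySem.List.pyRange 1 (((m + 2 : Nat)) : Int)
        = PySem.List.pyRange 1 (((m + 1 : Nat)) : Int) ++ [(((m + 1 : Nat)) : Int)] := by
      push_cast
      rw [show ((m : Int) + 2) = ((m : Int) + 1) + 1 by ring]
      exact PySem.List.pyRange_one_succ_right (by omega)
    rw [hsucc, List.foldl_append]
    have hlast : ∀ dacc, cpRowStep scheme dacc (((m + 1 : Nat)) : Int) = dacc := by
      intro dacc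
      unfold cpRowStep
      rw [if_neg]
      unfold PySem.List.len
      rw [hm]
      rintro ⟨_, h⟩
      apply h
      push_cast
      ring
    simp only [List.foldl_cons, List.foldl_nil, hlast]
    have hmid : ∀ (acc : PySem.Dict Int Int), ∀ x ∈ PySem.List.pyRange 1 (((m + 1 : Nat)) : Int),
        cpRowStep scheme acc x = innerFold acc (PySem.List.pyGetD scheme.dropLast x "") := by
      intro acc x hx
      rw [PySem.List.mem_pyRange_one] at hx
      have hget : PySem.List.pyGetD scheme x "" = PySem.List.pyGetD scheme.dropLast x "" := by
        rw [PySem.List.pyGetD_eq_getElem scheme "" (by omega) (by rw [hm]; push_cast; omega),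
          PySem.List.pyGetD_eq_getElem scheme.dropLast "" (by omega) (by rw [hdl]; push_cast; omega)]
        exact (List.getElem_dropLast ..).symm
      unfold cpRowStep innerFold
      rw [if_pos ⟨by omega, by unfold PySem.List.len; rw [hm]; push_cast; omega⟩, hget]
    rw [PySem.List.foldl_congr_mem _ _ _ _ hmid]
    rw [show (((m + 1 : Nat)) : Int) = ((scheme.dropLast.length : Nat) : Int) by rw [hdl]]
    have h := PySem.List.foldl_pyRange_pyGetD' scheme.dropLast "" innerFold PySem.Dict.empty
      (a := 1) (by norm_num)
    simpa using h

theorem interior_inv (rows : List String) :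
    ((rows.foldl innerFold PySem.Dict.empty).keys
        = intRange (rows.foldl (fun m row => max m row.toList.length) 0))
    ∧ ∀ c : Nat, (rows.foldl innerFold PySem.Dict.empty).getD (c : Int) 0
        = rows.foldl (fun (s : Int) row =>
            if c < row.toList.length ∧ row.toList[c]? = some '#' then s + 1 else s) 0 := by
  induction rows using List.reverseRecOn with
  | nil => exact ⟨by simp [intRange], fun c => by simp⟩
  | append_singleton rows row ih =>
    obtain ⟨ik, ihd⟩ := ih
    simp only [List.foldl_append, List.foldl_cons, List.foldl_nil]
    have hcp := cp_inner row (rows.foldl (fun m row => max m row.toList.length) 0)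
      row.toList.length (rows.foldl innerFold PySem.Dict.empty) ik
    constructor
    · have := hcp.1
      rw [innerFold, str_len_eq]
      exact this
    · intro c
      rw [innerFold, str_len_eq, hcp.2 c, ihd c]
      by_cases h : c < row.toList.length ∧ row.toList[c]? = some '#'
      · rw [if_pos h, if_pos h]
      · rw [if_neg h, if_neg h]
        norm_num

theorem foldl_max_len (rows : List String) (m : Nat) :
    rows.foldl (fun (a : Int) row => max a (PySem.Str.len row)) (m : Int)
    = ((rows.foldl (fun a row => max a row.toList.length) m : Nat) : Int) := by
  induction rows generalizing m with
  | nil => rfl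
  | cons r t ih =>
    simp only [List.foldl_cons]
    rw [str_len_eq, ← Nat.cast_max, ih (max m r.toList.length)]

theorem count_pins_eq (scheme : List String) : count_pins scheme = count_pins_alt scheme := by
  simp only [count_pins, count_pins_alt]
  rw [outer_reduce, slice_interior]
  obtain ⟨ik, ihd⟩ := interior_inv (scheme.dropLast.drop 1)
  rw [ik]
  rw [PySem.List.sorted_eq_self_of_pairwise _ _ (intRange_pairwise _)]
  have hwidth : (scheme.dropLast.drop 1).foldl (fun w row => max w (PySem.Str.len row)) 0
      = (((scheme.dropLast.drop 1).foldl (fun m row => max m row.toList.length) 0 : Nat) : Int) := by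
    exact_mod_cast foldl_max_len _ 0
  rw [hwidth, pyRange_eq_intRange]
  apply List.map_congr_left
  intro col hcol
  obtain ⟨h0, hlt⟩ := mem_intRange.mp hcol
  rw [show col = ((col.toNat : Nat) : Int) by omega, ihd col.toNat]
  apply PySem.List.foldl_congr_mem
  intro acc row _
  have hiff2 : (col.toNat < row.toList.length ∧ row.toList[col.toNat]? = some '#')
      ↔ (((col.toNat : Nat) : Int) < PySem.Str.len row
          ∧ PySem.Str.pyGet? row ((col.toNat : Nat) : Int) = some '#') := by
    rw [str_len_eq, PySem.Str.pyGet?_natCast]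
    exact and_congr Nat.cast_lt.symm Iff.rfl
  exact if_congr hiff2 rfl rfl

theorem cat_fold (schemes : List (List String)) (l k : List (List Int)) :
    schemes.foldl (fun (p : List (List Int) × List (List Int)) scheme =>
      let pins := count_pins scheme
      if PySem.Str.pyGet? (PySem.List.pyGetD scheme 0 "") 0 = some '#' then (p.1 ++ [pins], p.2)
      else (p.1, p.2 ++ [pins])) (l, k)
    = (l ++ (schemes.filter
          (fun s => PySem.Str.pyGet? (PySem.List.pyGetD s 0 "") 0 == some '#')).map count_pins_alt,
       k ++ (schemes.filter
          (fun s => !(PySem.Str.pyGet? (PySem.List.pyGetD s 0 "") 0 == some '#'))).map count_pins_alt)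
    := by
  induction schemes generalizing l k with
  | nil => simp
  | cons s ss ih =>
    simp only [List.foldl_cons, List.filter_cons]
    by_cases h : PySem.Str.pyGet? (PySem.List.pyGetD s 0 "") 0 = some '#'
    · have h' : PySem.List.pyGet? (PySem.List.pyGetD s 0 "").toList 0 = some '#' := by
        simpa using h
      rw [if_pos h, ih]
      simp [h', count_pins_eq]
    · have h' : ¬ PySem.List.pyGet? (PySem.List.pyGetD s 0 "").toList 0 = some '#' := by
        simpa using h
      rw [if_neg h, ih]
      simp [h', count_pins_eq]

-- ===== VERDICT (by name: the statement is the Claim_ definition above) =====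
theorem categorize_schemes_spec : Claim_equal_categorize_schemes := by
  unfold Claim_equal_categorize_schemes
  intro schemes _ _
  unfold Spec_categorize_schemes categorize_schemes categorize_schemes_alt
  rw [cat_fold]
  simp
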